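-- pv_equiv track=rewrite | github.com/ouvir/Algorithm | 백준/Gold/5052. 전화번호 목록/전화번호 목록.py | check
-- ===== SOURCE A (Python) =====
-- def check(numbers):
--     memo = set()
--     for number in numbers:
--         for i in range(len(number)):
--             if number[:i+1] in memo:
--                 return "NO"
--         memo.add(number)
--     return "YES"
-- ===== SOURCE B (Python) =====
-- def check(numbers):
--     # Trie of previously inserted numbers; while inserting, an end-marker met
--     # after consuming any character means an earlier number is a prefix.
--     root = [False, {}]  # [end_marker, children]
--     for number in numbers:
--         node = root
--         for ch in number:
--             nxt = node[1].get(ch)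
--             if nxt is None:
--                 nxt = [False, {}]
--                 node[1][ch] = nxt
--             node = nxt
--             if node[0]:
--                 return "NO"
--         node[0] = True
--     return "YES"
-- ===== Notes on version B (the rewrite author's own statement) =====
-- stated objective: alternative
-- what changed: Replaces the set of seen numbers plus per-number enumeration of all its string-slice prefixes with a character trie carrying end markers: each number is inserted char by char and an end marker met along the path signals that an earlier number is a prefix.
import Mathlib
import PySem

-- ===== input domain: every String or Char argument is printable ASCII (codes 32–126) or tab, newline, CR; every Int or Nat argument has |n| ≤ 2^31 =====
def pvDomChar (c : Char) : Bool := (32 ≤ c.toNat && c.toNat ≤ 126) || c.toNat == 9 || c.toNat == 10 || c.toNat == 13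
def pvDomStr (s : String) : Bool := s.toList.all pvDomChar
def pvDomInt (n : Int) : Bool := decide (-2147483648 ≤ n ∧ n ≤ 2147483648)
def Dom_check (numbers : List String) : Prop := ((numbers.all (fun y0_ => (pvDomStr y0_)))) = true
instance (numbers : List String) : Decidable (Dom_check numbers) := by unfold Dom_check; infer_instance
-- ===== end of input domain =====

-- B replaces A's seen-set plus per-number enumeration of all string-slice prefixes by a
-- character trie with end markers walked once per number (objective: alternative algorithm).

-- ===== PORT A =====
-- A: memo = set(); for number: for i in range(len(number)): if number[:i+1] in memo: return "NO"; memo.add(number); return "YES"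
def checkGo : List String → PySem.Set String → String
  | [], _ => "YES"
  | number :: rest, memo =>
    if (PySem.List.pyRange 0 (PySem.Str.len number) 1).any
        (fun i => PySem.Set.contains memo (PySem.Str.slice number none (some (i + 1))))
    then "NO"
    else checkGo rest (PySem.Set.add memo number)

def check (numbers : List String) : String := checkGo numbers PySem.Set.empty

-- ===== PORT B =====
-- node = [end_marker, children]  (Python: list [False, {}]); children keyed by Char.
mutual
inductive Trie : Type
  | node : Bool → Children → Trie
  deriving DecidableEq
inductive Children : Type
  | nil : Children
  | cons : Char → Trie → Children → Children
  deriving DecidableEq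
end

def Trie.mark : Trie → Bool
  | .node b _ => b

-- children.get(ch)  (Python dict .get)
def Children.find? : Children → Char → Option Trie
  | .nil, _ => none
  | .cons c' t rest, c => if c' = c then some t else rest.find? c

-- children[ch] = t  (overwrite in place, new keys appended — Python dict store)
def Children.store : Children → Char → Trie → Children
  | .nil, c, t => .cons c t .nil
  | .cons c' t' rest, c, t =>
    if c' = c then .cons c' t rest else .cons c' t' (rest.store c t)

-- B's inner loop: walk/create the path of cs, checking each visited node's marker;
-- returns the updated trie and whether a marker was hit (Python returns "NO" there,
-- so the trie returned in the hit case is never used).  Marks the final node.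
def Trie.ins : Trie → List Char → Trie × Bool
  | .node _ ch, [] => (.node true ch, false)
  | .node b ch, c :: cs =>
    let child := (ch.find? c).getD (.node false .nil)
    if child.mark then (.node b ch, true)
    else
      let r := child.ins cs
      (.node b (ch.store c r.1), r.2)
  termination_by _t w => w.length

def checkAltGo : List String → Trie → String
  | [], _ => "YES"
  | number :: rest, t =>
    let r := t.ins number.toList
    if r.2 then "NO" else checkAltGo rest r.1

def check_alt (numbers : List String) : String := checkAltGo numbers (.node false .nil)

-- ===== PRECONDITION & SPEC =====
def Spec_check (numbers : List String) (out : String) : Prop := out = check_alt numbers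
instance (numbers : List String) (out : String) : Decidable (Spec_check numbers out) := by unfold Spec_check; infer_instance

-- ===== CLAIM (what is proved, stated in full; the proofs are below) =====
def Claim_equal_check : Prop := ∀ (numbers : List String), Dom_check numbers → Spec_check numbers (check numbers)

-- ===== LEMMAS AND PROOFS =====

-- membership along a trie path: marker at the end of path p (used only in proofs)
def Trie.look : Trie → List Char → Bool
  | .node b _, [] => b
  | .node _ ch, c :: cs =>
    match ch.find? c with
    | none => false
    | some t' => t'.look cs
  termination_by _t w => w.length

theorem look_fresh (p : List Char) : (Trie.node false .nil).look p = false := by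
  cases p <;> simp [Trie.look, Children.find?]

theorem look_nil (t : Trie) : t.look [] = t.mark := by
  obtain ⟨b, ch⟩ := t; simp [Trie.look, Trie.mark]

theorem look_cons (b : Bool) (ch : Children) (c : Char) (p : List Char) :
    (Trie.node b ch).look (c :: p) = ((ch.find? c).getD (.node false .nil)).look p := by
  rw [Trie.look]
  cases hf : ch.find? c with
  | none => simp [look_fresh]
  | some t' => simp

theorem find?_store_self : ∀ (ch : Children) (c : Char) (t : Trie),
    (ch.store c t).find? c = some t
  | .nil, c, t => by simp [Children.store, Children.find?]
  | .cons c' t' rest, c, t => by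
    by_cases h : c' = c <;>
      simp [Children.store, Children.find?, h, find?_store_self rest c t]
  termination_by ch => sizeOf ch

theorem find?_store_ne : ∀ (ch : Children) (c c' : Char) (t : Trie), c' ≠ c →
    (ch.store c t).find? c' = ch.find? c'
  | .nil, c, c', t, h => by simp [Children.store, Children.find?, Ne.symm h]
  | .cons c'' t' rest, c, c', t, h => by
    by_cases h2 : c'' = c
    · subst h2
      simp [Children.store, Children.find?, Ne.symm h]
    · by_cases h3 : c'' = c' <;>
        simp [Children.store, Children.find?, h, h2, h3, find?_store_ne rest c c' t h]
  termination_by ch => sizeOf ch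

-- a hit during insertion ⟺ some marker sits on a nonempty prefix of the word
theorem ins_snd (cs : List Char) (t : Trie) :
    ((t.ins cs).2 = true) ↔ ∃ k, 1 ≤ k ∧ k ≤ cs.length ∧ t.look (cs.take k) = true := by
  induction cs generalizing t with
  | nil =>
    obtain ⟨b, ch⟩ := t
    simp [Trie.ins]
  | cons c cs' ih =>
    obtain ⟨b, ch⟩ := t
    rw [Trie.ins]
    have htake : ∀ k : Nat, 1 ≤ k → (Trie.node b ch).look (List.take k (c :: cs'))
        = ((ch.find? c).getD (.node false .nil)).look (List.take (k - 1) cs') := by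
      intro k hk
      match k, hk with
      | (k' + 1), _ => rw [List.take_succ_cons, look_cons]; simp
    by_cases hm : ((ch.find? c).getD (.node false .nil)).mark = true
    · rw [if_pos hm]
      constructor
      · intro _
        refine ⟨1, le_refl _, by simp, ?_⟩
        rw [htake 1 (le_refl _)]
        simpa only [Nat.sub_self, List.take_zero, look_nil] using hm
      · intro _; rfl
    · rw [if_neg hm]
      simp only []
      rw [ih]
      constructor
      · rintro ⟨k, hk1, hk2, hl⟩
        refine ⟨k + 1, by omega, by simp; omega, ?_⟩
        rw [htake (k + 1) (by omega)]
        simpa using hl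
      · rintro ⟨k, hk1, hk2, hl⟩
        rw [htake k hk1] at hl
        match k, hk1 with
        | 1, _ =>
          exfalso
          simp only [Nat.sub_self, List.take_zero, look_nil] at hl
          exact hm hl
        | (k' + 2), _ =>
          exact ⟨k' + 1, by omega, by simp at hk2; omega, by simpa using hl⟩

-- after a hit-free insertion the marked paths are the old ones plus the word itself
theorem ins_look (cs : List Char) (t : Trie) (h : (t.ins cs).2 = false) (p : List Char) :
    ((t.ins cs).1.look p = true) ↔ (t.look p = true ∨ p = cs) := by
  induction cs generalizing t p with
  | nil =>
    obtain ⟨b, ch⟩ := t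
    cases p with
    | nil => simp [Trie.ins, Trie.look]
    | cons c' p' =>
      rw [Trie.ins]
      simp only []
      rw [look_cons, look_cons]
      simp
  | cons c cs' ih =>
    obtain ⟨b, ch⟩ := t
    rw [Trie.ins] at h ⊢
    by_cases hm : ((ch.find? c).getD (.node false .nil)).mark = true
    · simp [hm] at h
    · rw [if_neg hm] at h ⊢
      simp only [] at h ⊢
      cases p with
      | nil => simp [Trie.look]
      | cons c' p' =>
        rw [look_cons, look_cons]
        by_cases hc : c' = c
        · subst hc
          rw [find?_store_self]
          simp only [Option.getD_some]
          rw [ih _ h]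
          simp
        · rw [find?_store_ne _ _ _ _ hc]
          simp [hc]

-- A's inner any-loop ⟺ some nonempty prefix of the number is in memo
theorem innerA_iff (memo : PySem.Set String) (number : String) :
    ((PySem.List.pyRange 0 (PySem.Str.len number) 1).any
        (fun i => PySem.Set.contains memo (PySem.Str.slice number none (some (i + 1)))) = true)
    ↔ ∃ k, 1 ≤ k ∧ k ≤ number.toList.length ∧
        (∃ s ∈ memo, s.toList = number.toList.take k) := by
  rw [List.any_eq_true]
  constructor
  · rintro ⟨i, hi, hc⟩
    rw [PySem.List.mem_pyRange_one, PySem.Str.len_eq] at hi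
    obtain ⟨h0, hlt⟩ := hi
    rw [PySem.Set.contains_iff] at hc
    refine ⟨(i + 1).toNat, by omega, by omega, ?_⟩
    refine ⟨_, hc, ?_⟩
    simp [PySem.Str.slice, PySem.List.slice_to _ (by omega : (0:Int) ≤ i + 1)]
  · rintro ⟨k, hk1, hk2, s, hs, hts⟩
    refine ⟨((k : Int) - 1), ?_, ?_⟩
    · rw [PySem.List.mem_pyRange_one, PySem.Str.len_eq]
      omega
    · rw [PySem.Set.contains_iff]
      have heq : PySem.Str.slice number none (some ((k : Int) - 1 + 1)) = s := by
        apply String.toList_inj.mp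
        rw [hts]
        have h1 : ((k : Int) - 1 + 1) = (k : Nat) := by omega
        rw [h1]
        simp [PySem.Str.slice, PySem.List.slice_to _ (by omega : (0:Int) ≤ ((k : Nat) : Int))]
      rw [heq]
      exact hs

-- main loop invariant: the trie's marked paths are exactly the char-lists of memo
theorem go_eq (numbers : List String) (memo : PySem.Set String) (t : Trie)
    (hinv : ∀ p, t.look p = true ↔ ∃ s ∈ memo, s.toList = p) :
    checkGo numbers memo = checkAltGo numbers t := by
  induction numbers generalizing memo t with
  | nil => rfl
  | cons number rest ih =>
    rw [checkGo, checkAltGo]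
    have hcond : ((PySem.List.pyRange 0 (PySem.Str.len number) 1).any
        (fun i => PySem.Set.contains memo (PySem.Str.slice number none (some (i + 1)))) = true)
        ↔ ((t.ins number.toList).2 = true) := by
      rw [innerA_iff, ins_snd]
      constructor
      · rintro ⟨k, h1, h2, hs⟩
        exact ⟨k, h1, h2, (hinv _).mpr hs⟩
      · rintro ⟨k, h1, h2, hl⟩
        exact ⟨k, h1, h2, (hinv _).mp hl⟩
    by_cases hA : (PySem.List.pyRange 0 (PySem.Str.len number) 1).any
        (fun i => PySem.Set.contains memo (PySem.Str.slice number none (some (i + 1)))) = true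
    · rw [if_pos hA, if_pos (hcond.mp hA)]
    · have hB : (t.ins number.toList).2 = false := by
        rcases Bool.eq_false_or_eq_true (t.ins number.toList).2 with h | h
        · exact absurd (hcond.mpr h) hA
        · exact h
      rw [if_neg hA, hB, if_neg (by simp)]
      apply ih
      intro p
      rw [ins_look _ _ hB]
      constructor
      · rintro (hl | rfl)
        · obtain ⟨s, hs, hts⟩ := (hinv p).mp hl
          exact ⟨s, by rw [PySem.Set.mem_add]; exact Or.inl hs, hts⟩
        · exact ⟨number, by rw [PySem.Set.mem_add]; exact Or.inr rfl, rfl⟩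
      · rintro ⟨s, hs, hts⟩
        rw [PySem.Set.mem_add] at hs
        rcases hs with hs | rfl
        · exact Or.inl ((hinv p).mpr ⟨s, hs, hts⟩)
        · exact Or.inr hts.symm

-- ===== VERDICT (by name: the statement is the Claim_ definition above) =====
theorem check_spec : Claim_equal_check := by
  intro numbers _
  unfold Spec_check check check_alt
  apply go_eq
  intro p
  rw [look_fresh]
  simp [PySem.Set.empty]
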